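-- pv_equiv track=rewrite | github.com/Ethan-Yys/PDMRec | dataloader.py | merge_user_seq
-- ===== SOURCE A (Python) =====
-- def merge_user_seq(a, b):
--     ans = []
--     i = len(a) - 1
--     j = len(b) - 1
--     b = b[::-1]
--
--     while i >= 0 and j >= 0:
--         ans.insert(0, a[i])
--         ans.insert(0, b[j])
--         i -= 1
--         j -= 1
--     if i == -1:
--         return b[:j + 1] + ans
--     if j == -1:
--         return a[:i + 1] + ans
-- ===== SOURCE B (Python) =====
-- def merge_user_seq(a, b):
--     n = min(len(a), len(b))
--     tail = a[len(a) - n:]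
--     core = [x for p in zip(reversed(b[:n]), tail) for x in p]
--     if len(b) > len(a):
--         return list(reversed(b[n:])) + core
--     return a[:len(a) - n] + core
-- ===== Notes on version B (the rewrite author's own statement) =====
-- stated objective: faster
-- what changed: Replaced the two-pointer while loop with repeated ans.insert(0, ...) by a direct slice/zip decomposition: zip the aligned end-slices (reversed(b[:n]) with a[-n:]), flatten, and prepend the leftover prefix of the longer list.
import Mathlib
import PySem

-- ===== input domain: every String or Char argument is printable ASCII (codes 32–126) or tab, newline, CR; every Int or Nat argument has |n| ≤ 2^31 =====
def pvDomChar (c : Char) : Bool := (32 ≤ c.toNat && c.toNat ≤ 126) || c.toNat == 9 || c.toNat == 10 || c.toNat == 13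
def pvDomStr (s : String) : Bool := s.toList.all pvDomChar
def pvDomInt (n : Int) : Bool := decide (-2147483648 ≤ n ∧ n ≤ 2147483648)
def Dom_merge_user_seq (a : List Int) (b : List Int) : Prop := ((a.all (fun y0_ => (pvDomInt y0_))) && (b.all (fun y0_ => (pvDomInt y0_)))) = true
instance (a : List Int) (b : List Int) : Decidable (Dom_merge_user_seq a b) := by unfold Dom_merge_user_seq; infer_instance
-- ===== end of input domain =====

-- B replaces A's two-pointer insert(0) loop by slice/zip decomposition: interleave the
-- aligned end-slices via zip, prepend the leftover prefix (objective: simpler).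


-- ===== PORT A =====
-- the while loop: state (ans, i, j); each step inserts a[i] then brev[j] at the front
-- (indices are always in range while the guard holds, so getD 0 is never the default)
def mergeLoopA (a brev : List Int) (i j : Int) (ans : List Int) : List Int × Int × Int :=
  if _h : i ≥ 0 ∧ j ≥ 0 then
    mergeLoopA a brev (i - 1) (j - 1)
      (((PySem.List.pyGet? brev j).getD 0) :: ((PySem.List.pyGet? a i).getD 0) :: ans)
  else (ans, i, j)
termination_by (i + 1).toNat
decreasing_by omega

def merge_user_seq (a : List Int) (b : List Int) : List Int :=
  let brev := b.reverse                                   -- b = b[::-1]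
  let r := mergeLoopA a brev ((a.length : Int) - 1) ((b.length : Int) - 1) []
  if r.2.1 = -1 then brev.take (r.2.2 + 1).toNat ++ r.1   -- b[:j+1] + ans  (j+1 ≥ 0 here)
  else if r.2.2 = -1 then a.take (r.2.1 + 1).toNat ++ r.1 -- a[:i+1] + ans  (i+1 ≥ 0 here)
  else []                                                 -- unreachable (Python: implicit None)

-- ===== PORT B =====
def merge_user_seq_alt (a : List Int) (b : List Int) : List Int :=
  let n := min a.length b.length
  let tail := a.drop (a.length - n)
  let core := (((b.take n).reverse).zip tail).flatMap (fun p => [p.1, p.2])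
  if b.length > a.length then (b.drop n).reverse ++ core
  else a.take (a.length - n) ++ core

-- ===== PRECONDITION & SPEC =====
def Spec_merge_user_seq (a : List Int) (b : List Int) (out : List Int) : Prop := out = merge_user_seq_alt a b
instance (a : List Int) (b : List Int) (out : List Int) : Decidable (Spec_merge_user_seq a b out) := by unfold Spec_merge_user_seq; infer_instance

-- ===== CLAIM (what is proved, stated in full; the proofs are below) =====
def Claim_equal_merge_user_seq : Prop := ∀ (a : List Int) (b : List Int), Dom_merge_user_seq a b → Spec_merge_user_seq a b (merge_user_seq a b)

-- ===== LEMMAS AND PROOFS =====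

-- interleave, for characterising both the loop's ans and B's zip/flatMap core
def il : List Int → List Int → List Int
  | x :: xs, y :: ys => x :: y :: il xs ys
  | _, _ => []

theorem flatMap_zip_eq_il : ∀ (xs ys : List Int),
    (xs.zip ys).flatMap (fun p => [p.1, p.2]) = il xs ys := by
  intro xs
  induction xs with
  | nil => intro ys; simp [il]
  | cons x xs ih =>
    intro ys
    cases ys with
    | nil => simp [il]
    | cons y ys => simp [il, ih]

theorem il_append : ∀ (xs ys : List Int) (x y : Int), xs.length = ys.length →
    il (xs ++ [x]) (ys ++ [y]) = il xs ys ++ [x, y] := by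
  intro xs
  induction xs with
  | nil => intro ys x y h; cases ys with
    | nil => simp [il]
    | cons _ _ => simp at h
  | cons a as ih =>
    intro ys x y h
    cases ys with
    | nil => simp at h
    | cons b bs =>
      simp only [List.cons_append, il]
      simp at h
      rw [ih bs x y h]

theorem mergeLoopA_spec : ∀ (p q : Nat) (a brev ans : List Int),
    p ≤ a.length → q ≤ brev.length →
    mergeLoopA a brev ((p : Int) - 1) ((q : Int) - 1) ans =
      (il ((brev.drop (q - min p q)).take (min p q)) ((a.drop (p - min p q)).take (min p q)) ++ ans,
       (p : Int) - (min p q : Nat) - 1, (q : Int) - (min p q : Nat) - 1) := by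
  intro p
  induction p with
  | zero =>
    intro q a brev ans _ _
    rw [mergeLoopA]
    simp [il]
  | succ p ih =>
    intro q a brev ans hp hq
    cases q with
    | zero =>
      rw [mergeLoopA]
      simp [il]
    | succ q =>
      rw [mergeLoopA]
      have hg : ((p + 1 : Nat) : Int) - 1 ≥ 0 ∧ ((q + 1 : Nat) : Int) - 1 ≥ 0 := by
        constructor <;> [push_cast; push_cast] <;> omega
      rw [dif_pos hg]
      have hpa : p < a.length := by omega
      have hqb : q < brev.length := by omega
      have e1 : ((p + 1 : Nat) : Int) - 1 - 1 = (p : Int) - 1 := by push_cast; omega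
      have e2 : ((q + 1 : Nat) : Int) - 1 - 1 = (q : Int) - 1 := by push_cast; omega
      have g1 : (PySem.List.pyGet? a (((p + 1 : Nat) : Int) - 1)).getD 0 = a[p] := by
        have : ((p + 1 : Nat) : Int) - 1 = ((p : Nat) : Int) := by push_cast; omega
        rw [this, PySem.List.pyGet?_natCast]
        simp [hpa]
      have g2 : (PySem.List.pyGet? brev (((q + 1 : Nat) : Int) - 1)).getD 0 = brev[q] := by
        have : ((q + 1 : Nat) : Int) - 1 = ((q : Nat) : Int) := by push_cast; omega
        rw [this, PySem.List.pyGet?_natCast]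
        simp [hqb]
      rw [e1, e2, g1, g2, ih q a brev _ (by omega) (by omega)]
      have hm : min (p + 1) (q + 1) = min p q + 1 := by omega
      set m := min p q with hmdef
      have hmp : m ≤ p := by omega
      have hmq : m ≤ q := by omega
      refine Prod.ext ?_ (Prod.ext ?_ ?_)
      · -- list component
        show il ((brev.drop (q - m)).take m) ((a.drop (p - m)).take m) ++ (brev[q] :: a[p] :: ans)
           = il ((brev.drop (q + 1 - min (p+1) (q+1))).take (min (p+1) (q+1)))
                ((a.drop (p + 1 - min (p+1) (q+1))).take (min (p+1) (q+1))) ++ ans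
        rw [hm]
        have eq1 : q + 1 - (m + 1) = q - m := by omega
        have eq2 : p + 1 - (m + 1) = p - m := by omega
        rw [eq1, eq2]
        have hb : (brev.drop (q - m)).take (m + 1) = (brev.drop (q - m)).take m ++ [brev[q]] := by
          have hlen : m < (brev.drop (q - m)).length := by simp; omega
          rw [List.take_add_one]
          congr 1
          have : (brev.drop (q - m))[m]? = some brev[q] := by
            rw [List.getElem?_drop]
            have : q - m + m = q := by omega
            rw [this, List.getElem?_eq_getElem hqb]
          simp [this]
        have ha : (a.drop (p - m)).take (m + 1) = (a.drop (p - m)).take m ++ [a[p]] := by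
          rw [List.take_add_one]
          congr 1
          have : (a.drop (p - m))[m]? = some a[p] := by
            rw [List.getElem?_drop]
            have : p - m + m = p := by omega
            rw [this, List.getElem?_eq_getElem hpa]
          simp [this]
        rw [hb, ha, il_append]
        · simp
        · simp; omega
      · show (p : Int) - (m : Nat) - 1 = ((p + 1 : Nat) : Int) - (min (p+1) (q+1) : Nat) - 1
        rw [hm]; push_cast; omega
      · show (q : Int) - (m : Nat) - 1 = ((q + 1 : Nat) : Int) - (min (p+1) (q+1) : Nat) - 1
        rw [hm]; push_cast; omega

-- reverse/drop/take bookkeeping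
theorem rev_drop (l : List Int) (n : Nat) :
    l.reverse.drop (l.length - n) = (l.take n).reverse := by
  rw [← List.reverse_take]

theorem merge_eq (a b : List Int) : merge_user_seq a b = merge_user_seq_alt a b := by
  unfold merge_user_seq merge_user_seq_alt
  have h := mergeLoopA_spec a.length b.length a b.reverse []
      (le_refl _) (by simp)
  dsimp only
  rw [h]
  rcases lt_trichotomy a.length b.length with hlt | heq | hgt
  · -- la < lb : A takes the i = -1 branch, B the (lb > la) branch
    have hm : min a.length b.length = a.length := by omega
    rw [hm]
    have hi : (a.length : Int) - (a.length : Nat) - 1 = -1 := by omega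
    rw [if_pos hi, if_pos hlt]
    have hj : (((b.length : Int) - (a.length : Nat) - 1) + 1).toNat = b.length - a.length := by omega
    rw [hj]
    have e1 : b.reverse.take (b.length - a.length) = (b.drop a.length).reverse := by
      rw [List.reverse_drop]
    have e2 : b.reverse.drop (b.length - a.length) = (b.take a.length).reverse := rev_drop b a.length
    have e3 : (a.drop (a.length - a.length)).take a.length = a := by simp
    have e4 : ((b.take a.length).reverse).take a.length = (b.take a.length).reverse := by
      apply List.take_of_length_le; simp
    rw [e1, e2, e3, e4, flatMap_zip_eq_il]
    simp
  · -- la = lb : A takes the i = -1 branch with empty prefix, B the else branch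
    have hm : min a.length b.length = b.length := by omega
    rw [hm]
    have hi : (a.length : Int) - (b.length : Nat) - 1 = -1 := by omega
    rw [if_pos hi, if_neg (by omega)]
    have hj : (((b.length : Int) - (b.length : Nat) - 1) + 1).toNat = 0 := by omega
    rw [hj]
    have e1 : (b.reverse.drop (b.length - b.length)).take b.length = (b.take b.length).reverse := by
      simp
    have e2 : (a.drop (a.length - b.length)).take b.length = a.drop (a.length - b.length) := by
      apply List.take_of_length_le; simp; omega
    rw [e1, e2, flatMap_zip_eq_il]
    simp [heq]
  · -- la > lb : A takes the j = -1 branch, B the else branch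
    have hm : min a.length b.length = b.length := by omega
    rw [hm]
    have hi : ¬ ((a.length : Int) - (b.length : Nat) - 1 = -1) := by omega
    rw [if_neg hi]
    have hjc : (b.length : Int) - (b.length : Nat) - 1 = -1 := by omega
    rw [if_pos hjc, if_neg (by omega)]
    have hii : (((a.length : Int) - (b.length : Nat) - 1) + 1).toNat = a.length - b.length := by
      omega
    rw [hii]
    have e1 : (b.reverse.drop (b.length - b.length)).take b.length = (b.take b.length).reverse := by
      simp
    have e2 : (a.drop (a.length - b.length)).take b.length = a.drop (a.length - b.length) := by
      apply List.take_of_length_le; simp; omega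
    rw [e1, e2, flatMap_zip_eq_il]
    simp

-- ===== VERDICT (by name: the statement is the Claim_ definition above) =====
theorem merge_user_seq_spec : Claim_equal_merge_user_seq := by
  intro a b _
  exact merge_eq a b
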